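-- pv_equiv track=rewrite | github.com/Lucian1611/portfolio_projects_1 | lucian_bidica/fun_stuff/numar_neconsecutiv_lista.py | first_non_consecutive
-- ===== SOURCE A (Python) =====
-- def first_non_consecutive(a):
--     i = 0
--     n = None
--     while i < len(a)-1:
--         if a[i]+1 != a[i+1]:
--             n = a[i+1]
--             break
--         i += 1
--     return n
-- ===== SOURCE B (Python) =====
-- def first_non_consecutive(a):
--     if not a:
--         return None
--     bad = [x for i, x in enumerate(a) if x != a[0] + i]
--     return bad[0] if bad else None
-- ===== Notes on version B (the rewrite author's own statement) =====
-- stated objective: alternative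
-- what changed: Instead of an early-exit scan comparing adjacent pairs a[i]+1 != a[i+1], B checks each element against the closed-form arithmetic progression a[0]+i, materialises the full list of violators in one comprehension, and returns its head (or None).
import Mathlib
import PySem

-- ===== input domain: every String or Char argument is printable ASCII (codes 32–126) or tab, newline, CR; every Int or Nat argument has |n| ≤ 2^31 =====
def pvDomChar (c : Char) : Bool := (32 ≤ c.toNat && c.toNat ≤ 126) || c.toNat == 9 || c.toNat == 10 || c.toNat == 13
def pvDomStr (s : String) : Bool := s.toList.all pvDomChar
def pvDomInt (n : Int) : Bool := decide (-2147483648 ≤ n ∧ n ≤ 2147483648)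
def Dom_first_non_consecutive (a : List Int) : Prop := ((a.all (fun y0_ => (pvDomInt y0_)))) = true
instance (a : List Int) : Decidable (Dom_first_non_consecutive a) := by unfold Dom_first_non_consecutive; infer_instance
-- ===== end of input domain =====

-- B drops A's early-exit adjacent-pair while loop: it checks each element against the closed-form progression a[0]+i, collects all violators in one pass, and returns the head of that list; objective: alternative, same O(n) cost.


-- ===== PORT A =====
-- while i < len(a)-1: if a[i]+1 != a[i+1]: n = a[i+1]; break; i += 1
def fncLoopA (a : List Int) (i : Nat) : Option Int :=
  if i < a.length - 1 then
    match PySem.List.pyGet? a (i : Int), PySem.List.pyGet? a ((i : Int) + 1) with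
    | some x, some y => if x + 1 ≠ y then some y else fncLoopA a (i + 1)
    | _, _ => none
  else none
termination_by a.length - i

def first_non_consecutive (a : List Int) : Option Int := fncLoopA a 0

-- ===== PORT B =====
-- bad = [x for i, x in enumerate(a) if x != a[0] + i]; return bad[0] if bad else None
def first_non_consecutive_alt (a : List Int) : Option Int :=
  match a with
  | [] => none
  | h :: _ =>
    let bad := ((PySem.List.enumerate a).filter (fun p => p.2 ≠ h + p.1)).map (·.2)
    bad.head?

-- ===== PRECONDITION & SPEC =====
def Spec_first_non_consecutive (a : List Int) (out : Option Int) : Prop := out = first_non_consecutive_alt a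
instance (a : List Int) (out : Option Int) : Decidable (Spec_first_non_consecutive a out) := by unfold Spec_first_non_consecutive; infer_instance

-- ===== CLAIM (what is proved, stated in full; the proofs are below) =====
def Claim_equal_first_non_consecutive : Prop := ∀ (a : List Int), Dom_first_non_consecutive a → Spec_first_non_consecutive a (first_non_consecutive a)

-- ===== LEMMAS AND PROOFS =====

-- proof-side reference recursion: expected value e, first element ≠ e+1 in the tail
def fncRef (e : Int) (rest : List Int) : Option Int :=
  match rest with
  | [] => none
  | x :: xs => if x ≠ e + 1 then some x else fncRef (e + 1) xs

lemma fnc_A_ref : ∀ (t : List Int) (h : Int) (pre : List Int),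
    fncLoopA (pre ++ h :: t) pre.length = fncRef h t := by
  intro t
  induction t with
  | nil =>
    intro h pre
    unfold fncLoopA fncRef
    simp
  | cons x xs ih =>
    intro h pre
    unfold fncLoopA
    have hlt : pre.length < (pre ++ h :: x :: xs).length - 1 := by simp
    have h1 : PySem.List.pyGet? (pre ++ h :: x :: xs) (pre.length : Int) = some h :=
      PySem.List.pyGet?_append_length pre (x :: xs) h
    have h2 : PySem.List.pyGet? (pre ++ h :: x :: xs) ((pre.length : Int) + 1) = some x := by
      have := PySem.List.pyGet?_append_right (pre := pre) (ys := h :: x :: xs) (k := 1)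
      simpa using this
    rw [if_pos hlt, h1, h2]
    dsimp only
    unfold fncRef
    by_cases hx : x = h + 1
    · subst hx
      rw [if_neg (by simp), if_neg (by simp)]
      have e : pre ++ h :: (h + 1) :: xs = (pre ++ [h]) ++ (h + 1) :: xs := by simp
      rw [e, show pre.length + 1 = (pre ++ [h]).length from by simp]
      exact ih (h + 1) (pre ++ [h])
    · rw [if_pos (by omega), if_pos (by omega)]

lemma fnc_B_ref : ∀ (t : List Int) (h k : Int),
    (((PySem.List.enumerate t (k + 1)).filter (fun p => p.2 ≠ h + p.1)).map (·.2)).head?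
      = fncRef (h + k) t := by
  intro t
  induction t with
  | nil => intro h k; simp [PySem.List.enumerate_nil, fncRef]
  | cons x xs ih =>
    intro h k
    rw [PySem.List.enumerate_cons]
    unfold fncRef
    by_cases hx : x = h + k + 1
    · subst hx
      rw [List.filter_cons_of_neg (by simp; ring)]
      rw [if_neg (by simp)]
      have := ih h (k + 1)
      rw [show h + k + 1 = h + (k + 1) by ring]
      exact this
    · rw [List.filter_cons_of_pos (by simp; intro he; exact hx (by omega))]
      rw [if_pos (by omega)]
      simp

-- ===== VERDICT (by name: the statement is the Claim_ definition above) =====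
theorem first_non_consecutive_spec : Claim_equal_first_non_consecutive := by
  intro a _
  unfold Spec_first_non_consecutive first_non_consecutive first_non_consecutive_alt
  match a with
  | [] => unfold fncLoopA; simp
  | h :: t =>
    dsimp only
    rw [PySem.List.enumerate_cons]
    rw [List.filter_cons_of_neg (by simp)]
    have hB := fnc_B_ref t h 0
    simp only [zero_add, add_zero] at hB ⊢
    rw [hB]
    exact fnc_A_ref t h []
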